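-- pv_equiv track=rewrite | github.com/kabads/advent-of-code-2024 | day0901.py | defrag
-- ===== SOURCE A (Python) =====
-- def defrag(filesystem_map):
--     next_digit_index = len(filesystem_map) - 1
--     for i in range(len(filesystem_map)):
--         if filesystem_map[i] is None:
--             while next_digit_index > i:
--                 if isinstance(filesystem_map[next_digit_index], int):
--                     filesystem_map[i], filesystem_map[next_digit_index] = filesystem_map[next_digit_index], filesystem_map[i]
--                     next_digit_index -= 1
--                     break
--                 next_digit_index -= 1
--     return filesystem_map
-- ===== SOURCE B (Python) =====
-- def defrag(filesystem_map):
--     # Closed-form compaction: count the files, collect the files lying past that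
--     # boundary (rightmost first), fill the gaps in the prefix with them, blank the tail.
--     n = len(filesystem_map)
--     F = sum(1 for x in filesystem_map if x is not None)
--     movers = [filesystem_map[p] for p in range(n - 1, F - 1, -1)
--               if filesystem_map[p] is not None]
--     k = 0
--     for i in range(F):
--         if filesystem_map[i] is None:
--             filesystem_map[i] = movers[k]
--             k += 1
--     for i in range(F, n):
--         filesystem_map[i] = None
--     return filesystem_map
-- ===== Notes on version B (the rewrite author's own statement) =====
-- stated objective: alternative
-- what changed: A sweeps a left index and a persistent right pointer over the list, swapping each gap with the rightmost remaining file; B instead computes the file count F in one pass, collects the files at positions >= F (rightmost first) and writes them into the gaps of the first F slots, blanking the tail - a counting closed form with no pointer interplay.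
import Mathlib
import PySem

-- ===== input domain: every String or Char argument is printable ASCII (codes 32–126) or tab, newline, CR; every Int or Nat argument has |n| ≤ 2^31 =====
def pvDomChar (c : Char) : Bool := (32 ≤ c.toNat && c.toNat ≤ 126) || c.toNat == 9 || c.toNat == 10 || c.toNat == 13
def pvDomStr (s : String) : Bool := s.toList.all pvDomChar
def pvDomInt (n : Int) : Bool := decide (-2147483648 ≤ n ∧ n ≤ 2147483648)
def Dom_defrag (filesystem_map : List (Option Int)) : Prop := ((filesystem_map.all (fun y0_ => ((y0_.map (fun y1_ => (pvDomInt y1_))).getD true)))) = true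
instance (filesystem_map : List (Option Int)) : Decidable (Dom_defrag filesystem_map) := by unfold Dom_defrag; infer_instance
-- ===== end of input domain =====

-- B replaces A's in-place two-pointer swap sweep by a counting closed form (count the files,
-- fill the prefix gaps with the past-boundary files taken rightmost first, blank the tail);
-- equivalence is about the returned list (in Python both also mutate their argument in place).

-- ===== PORT A =====
-- inner `while next_digit_index > i` loop of A
def defragInner (fm : List (Option Int)) (i : Nat) (ndi : Int) : List (Option Int) × Int :=
  if _h : (i : Int) < ndi then
    match fm.getD ndi.toNat none with
    | some v => ((fm.set i (some v)).set ndi.toNat (fm.getD i none), ndi - 1)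
    | none => defragInner fm i (ndi - 1)
  else (fm, ndi)
termination_by (ndi - i).toNat
decreasing_by omega

-- outer `for i in range(len(filesystem_map))` loop of A
def defragOuter (fm : List (Option Int)) (ndi : Int) (i n : Nat) : List (Option Int) × Int :=
  if i < n then
    let st := match fm.getD i none with
      | none => defragInner fm i ndi
      | some _ => (fm, ndi)
    defragOuter st.1 st.2 (i + 1) n
  else (fm, ndi)
termination_by n - i

def defrag (filesystem_map : List (Option Int)) : List (Option Int) :=
  (defragOuter filesystem_map ((filesystem_map.length : Int) - 1) 0 filesystem_map.length).1

-- ===== PORT B =====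
def defrag_alt (filesystem_map : List (Option Int)) : List (Option Int) :=
  let n := filesystem_map.length
  let F := filesystem_map.countP (fun x => x.isSome)
  let movers := (PySem.List.pyRange ((n : Int) - 1) ((F : Int) - 1) (-1)).filterMap
      (fun p => match PySem.List.pyGet? filesystem_map p with
        | some (some v) => some (some v)
        | _ => none)
  let st := (List.range F).foldl
      (fun (st : List (Option Int) × Nat) i =>
        match st.1.getD i none with
        | none => (st.1.set i (movers.getD st.2 none), st.2 + 1)
        | some _ => st) (filesystem_map, 0)
  (List.range' F (n - F)).foldl (fun l i => l.set i none) st.1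

-- ===== PRECONDITION & SPEC =====
def Spec_defrag (filesystem_map : List (Option Int)) (out : List (Option Int)) : Prop := out = defrag_alt filesystem_map
instance (filesystem_map : List (Option Int)) (out : List (Option Int)) : Decidable (Spec_defrag filesystem_map out) := by unfold Spec_defrag; infer_instance

-- ===== CLAIM (what is proved, stated in full; the proofs are below) =====
def Claim_equal_defrag : Prop := ∀ (filesystem_map : List (Option Int)), Dom_defrag filesystem_map → Spec_defrag filesystem_map (defrag filesystem_map)

-- ===== LEMMAS AND PROOFS =====

-- index (from the left) and value of the LAST `some` entry
def lastFile : List (Option Int) → Option (Nat × Int)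
  | [] => none
  | x :: t =>
    match lastFile t with
    | some (p, v) => some (p + 1, v)
    | none => match x with | some v => some (0, v) | none => none

theorem lastFile_lt_length : ∀ (t : List (Option Int)) (p : Nat) (v : Int), lastFile t = some (p, v) → p < t.length := by
  intro t
  induction t with
  | nil => intro p v h; simp [lastFile] at h
  | cons x t ih =>
    intro p v h
    simp only [lastFile] at h
    cases ht : lastFile t with
    | some pv =>
      obtain ⟨q, w⟩ := pv
      rw [ht] at h
      simp only [Option.some.injEq, Prod.mk.injEq] at h
      have := ih q w ht
      simp only [List.length_cons]
      omega
    | none =>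
      rw [ht] at h
      cases x with
      | some v' => simp only [Option.some.injEq, Prod.mk.injEq] at h; simp [← h.1]
      | none => simp at h

theorem lastFile_none : ∀ (t : List (Option Int)), lastFile t = none → t = List.replicate t.length none := by
  intro t
  induction t with
  | nil => intro _; rfl
  | cons x t ih =>
    intro h
    simp only [lastFile] at h
    cases ht : lastFile t with
    | some pv => obtain ⟨p, v⟩ := pv; rw [ht] at h; simp at h
    | none =>
      rw [ht] at h
      cases x with
      | some v => simp at h
      | none =>
        have := ih ht
        simp only [List.length_cons, List.replicate_succ]
        exact congrArg _ this

theorem lastFile_spec : ∀ (t : List (Option Int)) (p : Nat) (v : Int), lastFile t = some (p, v) →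
    t = t.take p ++ some v :: List.replicate (t.length - p - 1) none := by
  intro t
  induction t with
  | nil => intro p v h; simp [lastFile] at h
  | cons x t ih =>
    intro p v h
    simp only [lastFile] at h
    cases ht : lastFile t with
    | some pv =>
      obtain ⟨q, w⟩ := pv
      rw [ht] at h
      simp only [Option.some.injEq, Prod.mk.injEq] at h
      obtain ⟨hp, hv⟩ := h
      subst hp; subst hv
      have hdec := ih q w ht
      conv_lhs => rw [hdec]
      simp only [List.take_succ_cons, List.length_cons, List.cons_append]
      have harr : t.length - q - 1 = t.length + 1 - (q + 1) - 1 := by omega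
      rw [harr]
    | none =>
      rw [ht] at h
      cases x with
      | none => simp at h
      | some v' =>
        simp only [Option.some.injEq, Prod.mk.injEq] at h
        obtain ⟨hp, hv⟩ := h
        subst hp; subst hv
        have hrep := lastFile_none t ht
        simp only [List.take_zero, List.length_cons, List.nil_append, Nat.sub_zero,
          Nat.add_sub_cancel]
        exact congrArg _ hrep

-- canonical recursive form of the compaction
def cf : List (Option Int) → List (Option Int)
  | [] => []
  | some v :: t => some v :: cf t
  | none :: t =>
    match h : lastFile t with
    | none => none :: t
    | some (p, v) => some v :: (cf (t.take p) ++ List.replicate (t.length - p) none)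
termination_by l => l.length
decreasing_by all_goals simp

theorem cf_nil : cf [] = [] := by rw [cf]

theorem cf_some (v : Int) (t : List (Option Int)) : cf (some v :: t) = some v :: cf t := by rw [cf]

theorem cf_none_none (t : List (Option Int)) (h : lastFile t = none) : cf (none :: t) = none :: t := by
  rw [cf]
  split
  · rfl
  · rename_i p v h'; rw [h] at h'; cases h'

theorem cf_none_some (t : List (Option Int)) (p : Nat) (v : Int) (h : lastFile t = some (p, v)) :
    cf (none :: t) = some v :: (cf (t.take p) ++ List.replicate (t.length - p) none) := by
  rw [cf]
  split
  · rename_i h'; rw [h] at h'; cases h'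
  · rename_i p' v' h'
    rw [h] at h'
    injection h' with h''
    injection h'' with h1 h2
    subst h1; subst h2
    rfl

-- fill the `none` slots of the first list with successive elements of the second
def fill : List (Option Int) → List (Option Int) → List (Option Int)
  | [], _ => []
  | some v :: t, s => some v :: fill t s
  | none :: t, m :: s => m :: fill t s
  | none :: t, [] => none :: fill t []

theorem fill_nil (s : List (Option Int)) : fill [] s = [] := rfl

theorem fill_some_cons (v : Int) (x s : List (Option Int)) :
    fill (some v :: x) s = some v :: fill x s := rfl

theorem fill_none_cons (x : List (Option Int)) (m : Option Int) (s : List (Option Int)) :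
    fill (none :: x) (m :: s) = m :: fill x s := rfl

theorem fill_none_nil (x : List (Option Int)) :
    fill (none :: x) [] = none :: fill x [] := rfl

def moversOf (fm : List (Option Int)) : List (Option Int) :=
  ((fm.drop (fm.countP (fun x => x.isSome))).filter (fun x => x.isSome)).reverse

def build (fm : List (Option Int)) : List (Option Int) :=
  fill (fm.take (fm.countP (fun x => x.isSome))) (moversOf fm)
    ++ List.replicate (fm.length - fm.countP (fun x => x.isSome)) none

-- ---------- small helpers ----------

theorem getD_all_none {l : List (Option Int)} (h : ∀ x ∈ l, x = none) (m : Nat) :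
    l.getD m none = none := by
  rw [List.getD_eq_getElem?_getD]
  cases hx : l[m]? with
  | none => rfl
  | some x => have hm := List.mem_of_getElem? hx; simp [h x hm]

theorem fill_length : ∀ (a s : List (Option Int)), (fill a s).length = a.length := by
  intro a
  induction a with
  | nil => intro s; simp [fill]
  | cons x t ih =>
    intro s
    cases x with
    | some v => simp [fill, ih]
    | none =>
      cases s with
      | nil => simp [fill, ih]
      | cons m s' => simp [fill, ih]

theorem take_set_succ {α : Type} : ∀ (l : List α) (i : Nat) (c : α), i < l.length →
    (l.set i c).take (i + 1) = l.take i ++ [c] := by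
  intro l
  induction l with
  | nil => intro i c hi; simp at hi
  | cons x t ih =>
    intro i c hi
    cases i with
    | zero => simp
    | succ i =>
      simp only [List.set_cons_succ, List.take_succ_cons, List.cons_append]
      rw [ih i c (by simp at hi; omega)]

theorem drop_set_succ {α : Type} : ∀ (l : List α) (i : Nat) (c : α),
    (l.set i c).drop (i + 1) = l.drop (i + 1) := by
  intro l
  induction l with
  | nil => intro i c; rfl
  | cons x t ih =>
    intro i c
    cases i with
    | zero => simp
    | succ i =>
      simp only [List.set_cons_succ, List.drop_succ_cons]
      exact ih i c

-- ---------- B's port equals `build` ----------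

theorem pyRange_neg_one (a b : Int) :
    PySem.List.pyRange a b (-1) = (List.range (a - b).toNat).map (fun k : Nat => a - (k : Int)) := by
  simp only [PySem.List.pyRange]
  rw [if_neg (by norm_num), if_neg (by norm_num)]
  by_cases h : b < a
  · rw [if_pos h]
    have hc : (a - b + - -1 - 1) / - -1 = a - b := by norm_num
    rw [hc]
    apply List.map_congr_left
    intro k _
    ring
  · rw [if_neg h]
    have h0 : (a - b).toNat = 0 := by omega
    rw [h0]
    simp

theorem filterMap_getIdx : ∀ (idxs : List Nat) (fm : List (Option Int)), (∀ i ∈ idxs, i < fm.length) →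
    (idxs.map (fun i : Nat => (i : Int))).filterMap
      (fun p => match PySem.List.pyGet? fm p with
        | some (some v) => some (some v)
        | _ => none)
    = (idxs.map (fun i => fm.getD i none)).filter (fun x => x.isSome) := by
  intro idxs
  induction idxs with
  | nil => intro fm _; simp
  | cons i rest ih =>
    intro fm h
    have hi : i < fm.length := h i (by simp)
    simp only [List.map_cons, List.filterMap_cons]
    have hpg : PySem.List.pyGet? fm ((i : Nat) : Int) = some fm[i] := by
      rw [PySem.List.pyGet?_natCast]
      exact List.getElem?_eq_getElem hi
    rw [hpg]
    have hgd : fm.getD i none = fm[i] := List.getD_eq_getElem fm none hi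
    rw [hgd]
    rw [ih fm (fun j hj => h j (List.mem_cons_of_mem _ hj))]
    cases hx : fm[i] with
    | none => simp
    | some v => simp

theorem rev_idx : ∀ (m F : Nat) (fm : List (Option Int)), F + m ≤ fm.length →
    (List.range m).map (fun k => fm.getD (F + m - 1 - k) none) = ((fm.drop F).take m).reverse := by
  intro m
  induction m with
  | zero => intro F fm _; simp
  | succ m ih =>
    intro F fm h
    have hFm : F + m < fm.length := by omega
    rw [List.range_succ_eq_map, List.map_cons]
    have hhead : fm.getD (F + (m + 1) - 1 - 0) none = fm[F + m] := by
      rw [show F + (m + 1) - 1 - 0 = F + m by omega]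
      exact List.getD_eq_getElem fm none hFm
    rw [hhead, List.map_map]
    have hfun : (List.range m).map ((fun k => fm.getD (F + (m + 1) - 1 - k) none) ∘ Nat.succ)
        = (List.range m).map (fun k => fm.getD (F + m - 1 - k) none) := by
      apply List.map_congr_left
      intro k _
      simp only [Function.comp_apply, Nat.succ_eq_add_one]
      congr 1
      omega
    rw [hfun, ih F fm (by omega)]
    have htake : (fm.drop F).take (m + 1) = (fm.drop F).take m ++ [fm[F + m]] := by
      rw [List.take_succ]
      have hg : (fm.drop F)[m]? = some fm[F + m] := by
        rw [List.getElem?_drop]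
        exact List.getElem?_eq_getElem hFm
      simp [hg]
    rw [htake, List.reverse_append]
    simp

theorem movers_eq (fm : List (Option Int)) :
    (PySem.List.pyRange ((fm.length : Int) - 1) ((fm.countP (fun x => x.isSome) : Int) - 1) (-1)).filterMap
      (fun p => match PySem.List.pyGet? fm p with
        | some (some v) => some (some v)
        | _ => none)
    = moversOf fm := by
  have hF : fm.countP (fun x => x.isSome) ≤ fm.length := List.countP_le_length
  rw [pyRange_neg_one]
  have h1 : ((fm.length : Int) - 1 - ((fm.countP (fun x => x.isSome) : Int) - 1)).toNat
      = fm.length - fm.countP (fun x => x.isSome) := by omega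
  rw [h1]
  have hidx : (List.range (fm.length - fm.countP (fun x => x.isSome))).map (fun k : Nat => ((fm.length : Int) - 1) - (k : Int))
      = ((List.range (fm.length - fm.countP (fun x => x.isSome))).map
          (fun k => fm.length - 1 - k)).map (fun i : Nat => (i : Int)) := by
    rw [List.map_map]
    apply List.map_congr_left
    intro k hk
    simp only [List.mem_range] at hk
    simp only [Function.comp_apply]
    omega
  rw [hidx]
  rw [filterMap_getIdx _ fm (by
    intro i hi
    simp only [List.mem_map, List.mem_range] at hi
    obtain ⟨k, hk, hik⟩ := hi
    omega)]
  rw [List.map_map]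
  have hcomp : ((fun i => fm.getD i none) ∘ fun k => fm.length - 1 - k)
      = (fun k => fm.getD (fm.countP (fun x => x.isSome) + (fm.length - fm.countP (fun x => x.isSome)) - 1 - k) none) := by
    funext k
    simp only [Function.comp_apply]
    congr 1
    omega
  rw [hcomp]
  rw [rev_idx (fm.length - fm.countP (fun x => x.isSome)) (fm.countP (fun x => x.isSome)) fm (by omega)]
  rw [List.filter_reverse]
  unfold moversOf
  congr 2
  have hlen : (fm.drop (fm.countP (fun x => x.isSome))).length = fm.length - fm.countP (fun x => x.isSome) := by simp
  rw [← hlen, List.take_length]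

theorem fold_fill : ∀ (m i : Nat) (l mv : List (Option Int)) (k : Nat), i + m ≤ l.length →
    ((List.range' i m).foldl
      (fun (st : List (Option Int) × Nat) idx =>
        match st.1.getD idx none with
        | none => (st.1.set idx (mv.getD st.2 none), st.2 + 1)
        | some _ => st) (l, k)).1
    = l.take i ++ fill ((l.drop i).take m) (mv.drop k) ++ l.drop (i + m) := by
  intro m
  induction m with
  | zero => intro i l mv k h; simp [fill]
  | succ m ih =>
    intro i l mv k h
    have hi : i < l.length := by omega
    rw [List.range'_succ, List.foldl_cons]
    have hdrop : l.drop i = l.getD i none :: l.drop (i + 1) := by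
      rw [List.drop_eq_getElem_cons hi, List.getD_eq_getElem l none hi]
    cases hd : l.getD i none with
    | some v =>
      simp only [hd]
      rw [ih (i + 1) l mv k (by omega)]
      have htake : l.take (i + 1) = l.take i ++ [some v] := by
        rw [List.take_succ]
        have hg : l[i]? = some (some v) := by
          rw [List.getElem?_eq_getElem hi, ← List.getD_eq_getElem l none hi, hd]
        simp [hg]
      rw [htake, hdrop, hd]
      rw [List.take_succ_cons, fill_some_cons]
      rw [show i + 1 + m = i + (m + 1) by omega]
      simp
    | none =>
      simp only [hd]
      rw [ih (i + 1) (l.set i (mv.getD k none)) mv (k + 1) (by simp; omega)]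
      rw [take_set_succ l i (mv.getD k none) hi, drop_set_succ l i (mv.getD k none)]
      have h3 : (l.set i (mv.getD k none)).drop (i + 1 + m) = l.drop (i + (m + 1)) := by
        rw [show i + 1 + m = i + 1 + m from rfl, ← List.drop_drop, drop_set_succ l i (mv.getD k none),
            List.drop_drop, show i + 1 + m = i + (m + 1) by omega]
      rw [h3, hdrop, hd, List.take_succ_cons]
      have hgd : mv.getD k none = (mv.drop k).getD 0 none := by
        simp [List.getD_eq_getElem?_getD, List.getElem?_drop]
      have hdk : mv.drop (k + 1) = (mv.drop k).drop 1 := by rw [List.drop_drop]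
      have hfill : fill (none :: (l.drop (i + 1)).take m) (mv.drop k)
          = mv.getD k none :: fill ((l.drop (i + 1)).take m) (mv.drop (k + 1)) := by
        cases hmk : mv.drop k with
        | nil => rw [hgd, hdk, hmk]; rw [fill_none_nil]; simp
        | cons c0 s => rw [hgd, hdk, hmk]; rw [fill_none_cons]; simp
      rw [hfill]
      simp

theorem fold_blank : ∀ (m i : Nat) (l : List (Option Int)), l.length = i + m →
    (List.range' i m).foldl (fun l idx => l.set idx none) l = l.take i ++ List.replicate m none := by
  intro m
  induction m with
  | zero =>
    intro i l h
    rw [List.take_of_length_le (by omega)]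
    simp
  | succ m ih =>
    intro i l h
    have hi : i < l.length := by omega
    rw [List.range'_succ, List.foldl_cons]
    rw [ih (i + 1) (l.set i none) (by simp; omega)]
    rw [take_set_succ l i none hi]
    simp [List.replicate_succ]

theorem defrag_alt_eq_build : ∀ (fm : List (Option Int)), defrag_alt fm = build fm := by
  intro fm
  have hF : fm.countP (fun x => x.isSome) ≤ fm.length := List.countP_le_length
  unfold defrag_alt
  simp only [movers_eq fm, List.range_eq_range']
  rw [fold_fill (fm.countP (fun x => x.isSome)) 0 fm (moversOf fm) 0 (by omega)]
  simp only [List.take_zero, List.drop_zero, List.nil_append, Nat.zero_add]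
  rw [fold_blank (fm.length - fm.countP (fun x => x.isSome)) (fm.countP (fun x => x.isSome))
      _ (by simp [fill_length]; omega)]
  have hfl : (fill (fm.take (fm.countP (fun x => x.isSome))) (moversOf fm)).length
      = fm.countP (fun x => x.isSome) := by rw [fill_length]; simp; omega
  rw [List.take_left' hfl]
  unfold build
  rfl

-- ---------- `cf` equals `build` ----------

theorem cf_eq_build_aux : ∀ (L : Nat) (fm : List (Option Int)), fm.length ≤ L → cf fm = build fm := by
  intro L
  induction L with
  | zero =>
    intro fm h
    have hnil : fm = [] := by
      cases fm with
      | nil => rfl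
      | cons x t => simp at h
    subst hnil
    simp [cf_nil, build, moversOf, fill]
  | succ L ih =>
    intro fm h
    match fm with
    | [] => simp [cf_nil, build, moversOf, fill]
    | some v :: t =>
      rw [cf_some, ih t (by simp at h; omega)]
      unfold build moversOf
      have hc : (some v :: t).countP (fun x => x.isSome) = t.countP (fun x => x.isSome) + 1 := by
        simp [List.countP_cons]
      rw [hc]
      simp only [List.take_succ_cons, List.drop_succ_cons, List.length_cons]
      rw [fill_some_cons]
      have harr : t.length + 1 - (t.countP (fun x => x.isSome) + 1) = t.length - t.countP (fun x => x.isSome) := by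
        omega
      rw [harr]
      simp
    | none :: t =>
      cases ht : lastFile t with
      | none =>
        rw [cf_none_none t ht]
        have htr := lastFile_none t ht
        have h0 : t.countP (fun x => x.isSome) = 0 := by
          conv_lhs => rw [htr]
          simp [List.countP_replicate]
        unfold build moversOf
        have hc : (none :: t).countP (fun x => x.isSome) = 0 := by
          simp [List.countP_cons, h0]
        rw [hc]
        simp only [List.take_zero, List.drop_zero, List.length_cons, Nat.sub_zero]
        rw [fill_nil]
        simp only [List.nil_append, List.replicate_succ]
        exact congrArg _ htr
      | some pv =>
        obtain ⟨p, v⟩ := pv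
        rw [cf_none_some t p v ht]
        have hplen := lastFile_lt_length t p v ht
        have hdecomp := lastFile_spec t p v ht
        have hlent0 : (t.take p).length = p := by simp; omega
        have hF0 : (t.take p).countP (fun x => x.isSome) ≤ p := by
          calc (t.take p).countP (fun x => x.isSome) ≤ (t.take p).length := List.countP_le_length
          _ = p := hlent0
        have hFt : t.countP (fun x => x.isSome) = (t.take p).countP (fun x => x.isSome) + 1 := by
          conv_lhs => rw [hdecomp]
          simp [List.countP_append, List.countP_cons, List.countP_replicate]
        have hcN : (none :: t).countP (fun x => x.isSome) = (t.take p).countP (fun x => x.isSome) + 1 := by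
          simp [List.countP_cons, hFt]
        rw [ih (t.take p) (by simp at h ⊢; omega)]
        unfold build moversOf
        rw [hcN]
        simp only [List.take_succ_cons, List.drop_succ_cons, List.length_cons]
        set F0 := (t.take p).countP (fun x => x.isSome) with hF0def
        have htake : t.take F0 = (t.take p).take F0 := by
          rw [List.take_take]
          congr 1
          omega
        have hdrop : t.drop F0
            = (t.take p).drop F0 ++ some v :: List.replicate (t.length - p - 1) none := by
          conv_lhs => rw [hdecomp]
          rw [List.drop_append_of_le_length (by omega)]
        rw [htake, hdrop]
        rw [List.filter_append, List.reverse_append]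
        have hfrep : List.filter (fun x => x.isSome) (some v :: List.replicate (t.length - p - 1) (none : Option Int))
            = [some v] := by
          simp [List.filter_replicate]
        rw [hfrep]
        rw [show ([some v] : List (Option Int)).reverse = [some v] from rfl, List.singleton_append]
        rw [fill_none_cons]
        rw [hlent0]
        rw [List.cons_append]
        congr 1
        rw [List.append_assoc]
        congr 1
        rw [← List.replicate_add]
        congr 1
        omega

theorem cf_eq_build : ∀ (fm : List (Option Int)), cf fm = build fm := by
  intro fm
  exact cf_eq_build_aux fm.length fm le_rfl

-- ---------- A's port equals `cf` ----------

theorem outer_noop : ∀ (k i : Nat) (fm : List (Option Int)) (ndi : Int) (n : Nat), n ≤ i + k →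
    (∀ j : Nat, i ≤ j → fm.getD j none = none) → ndi < (i : Int) →
    (defragOuter fm ndi i n).1 = fm := by
  intro k
  induction k with
  | zero =>
    intro i fm ndi n hn h hlt
    rw [defragOuter, if_neg (by omega)]
  | succ k ih =>
    intro i fm ndi n hn h hlt
    rw [defragOuter]
    by_cases hin : i < n
    · rw [if_pos hin]
      have hi : fm.getD i none = none := h i le_rfl
      have hinner : defragInner fm i ndi = (fm, ndi) := by
        rw [defragInner, dif_neg (by omega)]
      simp only [hi, hinner]
      exact ih (i + 1) fm ndi n (by omega) (fun j hj => h j (by omega)) (by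
        have : (i : Int) < (i + 1 : Nat) := by push_cast; omega
        omega)
    · rw [if_neg hin]

theorem inner_none : ∀ (k : Nat) (fm : List (Option Int)) (i : Nat) (ndi : Int),
    (ndi - i).toNat ≤ k → (i : Int) ≤ ndi →
    (∀ q : Nat, i < q → (q : Int) ≤ ndi → fm.getD q none = none) →
    defragInner fm i ndi = (fm, (i : Int)) := by
  intro k
  induction k with
  | zero =>
    intro fm i ndi hk hle h
    have hndi : ndi = (i : Int) := by omega
    rw [defragInner, dif_neg (by omega), hndi]
  | succ k ih =>
    intro fm i ndi hk hle h
    by_cases hlt : (i : Int) < ndi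
    · rw [defragInner, dif_pos hlt]
      have hq : fm.getD ndi.toNat none = none := h ndi.toNat (by omega) (by omega)
      rw [hq]
      exact ih fm i (ndi - 1) (by omega) (by omega) (fun q hq1 hq2 => h q hq1 (by omega))
    · have hndi : ndi = (i : Int) := by omega
      rw [defragInner, dif_neg (by omega), hndi]

theorem inner_find : ∀ (k : Nat) (fm : List (Option Int)) (i j : Nat) (v : Int) (ndi : Int),
    (ndi - j).toNat ≤ k → i < j → (j : Int) ≤ ndi →
    fm.getD j none = some v →
    (∀ q : Nat, j < q → (q : Int) ≤ ndi → fm.getD q none = none) →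
    defragInner fm i ndi = ((fm.set i (some v)).set j (fm.getD i none), (j : Int) - 1) := by
  intro k
  induction k with
  | zero =>
    intro fm i j v ndi hk hij hle hget h
    have hndi : ndi = (j : Int) := by omega
    have htn : ndi.toNat = j := by omega
    rw [defragInner, dif_pos (by omega), htn, hget, hndi]
  | succ k ih =>
    intro fm i j v ndi hk hij hle hget h
    by_cases hlt : (j : Int) < ndi
    · rw [defragInner, dif_pos (by omega)]
      have hq : fm.getD ndi.toNat none = none := h ndi.toNat (by omega) (by omega)
      rw [hq]
      exact ih fm i j v (ndi - 1) (by omega) hij (by omega) hget (fun q hq1 hq2 => h q hq1 (by omega))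
    · have hndi : ndi = (j : Int) := by omega
      have htn : ndi.toNat = j := by omega
      rw [defragInner, dif_pos (by omega), htn, hget, hndi]

theorem set_append_len {α : Type} (l₁ : List α) (x : α) (l₂ : List α) (y : α) :
    (l₁ ++ x :: l₂).set l₁.length y = l₁ ++ y :: l₂ := by
  rw [List.set_append_right _ _ (le_refl l₁.length)]
  simp

theorem getD_append_at {α : Type} (l₁ : List α) (x : α) (l₂ : List α) (d : α) :
    (l₁ ++ x :: l₂).getD l₁.length d = x := by
  rw [List.getD_append_right _ _ _ _ (le_refl l₁.length)]
  simp

theorem outer_main : ∀ (L : Nat) (mid pre post : List (Option Int)) (ndi : Int) (n : Nat),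
    mid.length ≤ L →
    (∀ x ∈ post, x = none) →
    ndi = (pre.length : Int) + mid.length - 1 →
    n = pre.length + mid.length + post.length →
    (defragOuter (pre ++ mid ++ post) ndi pre.length n).1 = pre ++ cf mid ++ post := by
  intro L
  induction L with
  | zero =>
    intro mid pre post ndi n hL hpost hndi hn
    have hnil : mid = [] := by
      cases mid with
      | nil => rfl
      | cons x t => simp at hL
    subst hnil
    rw [cf_nil]
    simp only [List.append_nil, List.nil_append] at *
    apply outer_noop n pre.length (pre ++ post) ndi n (by omega)
    · intro j hj
      rw [List.getD_append_right _ _ _ _ hj]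
      exact getD_all_none hpost _
    · simp at hndi; omega
  | succ L ih =>
    intro mid pre post ndi n hL hpost hndi hn
    match mid with
    | [] =>
      rw [cf_nil]
      simp only [List.append_nil, List.nil_append] at *
      apply outer_noop n pre.length (pre ++ post) ndi n (by omega)
      · intro j hj
        rw [List.getD_append_right _ _ _ _ hj]
        exact getD_all_none hpost _
      · simp at hndi; omega
    | some v :: t =>
      have hin : pre.length < n := by simp at hn; omega
      have hassoc : pre ++ (some v :: t) ++ post = pre ++ some v :: (t ++ post) := by simp
      have hd : (pre ++ (some v :: t) ++ post).getD pre.length none = some v := by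
        rw [hassoc]; exact getD_append_at pre (some v) (t ++ post) none
      rw [defragOuter, if_pos hin]
      simp only [hd]
      have hre : pre ++ (some v :: t) ++ post = (pre ++ [some v]) ++ t ++ post := by simp
      have hlen1 : pre.length + 1 = (pre ++ [some v]).length := by simp
      rw [hre, hlen1]
      rw [ih t (pre ++ [some v]) post ndi n (by simp at hL; omega) hpost
          (by simp at hndi ⊢; push_cast at hndi ⊢; omega) (by simp at hn ⊢; omega)]
      rw [cf_some]
      simp
    | none :: t =>
      have hin : pre.length < n := by simp at hn; omega
      have hassoc : pre ++ (none :: t) ++ post = pre ++ (none : Option Int) :: (t ++ post) := by simp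
      have hd : (pre ++ (none :: t) ++ post).getD pre.length none = none := by
        rw [hassoc]; exact getD_append_at pre none (t ++ post) none
      rw [defragOuter, if_pos hin]
      simp only [hd]
      cases ht : lastFile t with
      | none =>
        have htr := lastFile_none t ht
        have hall : ∀ x ∈ ((none : Option Int) :: (t ++ post)), x = none := by
          intro x hx
          simp only [List.mem_cons, List.mem_append] at hx
          rcases hx with hx | hx | hx
          · exact hx
          · have : x ∈ List.replicate t.length (none : Option Int) := htr ▸ hx
            exact (List.eq_of_mem_replicate this)
          · exact hpost x hx
        have hnone : ∀ q : Nat, pre.length ≤ q → (pre ++ (none :: t) ++ post).getD q none = none := by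
          intro q hq
          rw [hassoc, List.getD_append_right _ _ _ _ hq]
          exact getD_all_none hall _
        have hinner := inner_none (ndi - pre.length).toNat (pre ++ (none :: t) ++ post) pre.length ndi
          (le_refl _) (by simp only [List.length_cons] at hndi; omega)
          (fun q hq1 _ => hnone q (by omega))
        rw [hinner]
        rw [cf_none_none t ht]
        apply outer_noop n (pre.length + 1) _ _ n (by omega)
        · intro j hj
          exact hnone j (by omega)
        · push_cast; omega
      | some pv =>
        obtain ⟨p, v⟩ := pv
        have hplen := lastFile_lt_length t p v ht
        have hdecomp := lastFile_spec t p v ht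
        have hlent0 : (t.take p).length = p := by simp; omega
        -- global index of the rightmost file
        have hsplit : pre ++ (none :: t) ++ post
            = (pre ++ none :: t.take p) ++ some v :: (List.replicate (t.length - p - 1) none ++ post) := by
          conv_lhs => rw [hdecomp]
          simp
        have hlenj : (pre ++ (none : Option Int) :: t.take p).length = pre.length + 1 + p := by
          simp [hlent0]; omega
        have hgj : (pre ++ (none :: t) ++ post).getD (pre.length + 1 + p) none = some v := by
          rw [hsplit, ← hlenj]
          exact getD_append_at _ (some v) _ none
        have htail_none : ∀ x ∈ (List.replicate (t.length - p - 1) (none : Option Int) ++ post), x = none := by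
          intro x hx
          simp only [List.mem_append] at hx
          rcases hx with hx | hx
          · exact List.eq_of_mem_replicate hx
          · exact hpost x hx
        have hq : ∀ q : Nat, pre.length + 1 + p < q → (q : Int) ≤ ndi →
            (pre ++ (none :: t) ++ post).getD q none = none := by
          intro q hq1 _
          rw [hsplit, List.getD_append_right _ _ _ _ (by omega : (pre ++ (none : Option Int) :: t.take p).length ≤ q)]
          rw [hlenj]
          have : q - (pre.length + 1 + p) = (q - (pre.length + 1 + p) - 1) + 1 := by omega
          rw [this]
          rw [List.getD_cons_succ]
          exact getD_all_none htail_none _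
        have hinner := inner_find (ndi - (pre.length + 1 + p)).toNat (pre ++ (none :: t) ++ post)
          pre.length (pre.length + 1 + p) v ndi
          (le_refl _) (by omega)
          (by simp only [List.length_cons] at hndi; push_cast; omega)
          hgj hq
        rw [hinner, hd]
        -- compute the mutated list
        have hset1 : (pre ++ (none :: t) ++ post).set pre.length (some v)
            = pre ++ some v :: (t ++ post) := by
          rw [hassoc, set_append_len]
        have hset2 : (pre ++ some v :: (t ++ post)).set (pre.length + 1 + p) (none : Option Int)
            = (pre ++ [some v]) ++ t.take p ++ ((none : Option Int) :: (List.replicate (t.length - p - 1) none ++ post)) := by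
          have hs : pre ++ some v :: (t ++ post)
              = (pre ++ some v :: t.take p) ++ some v :: (List.replicate (t.length - p - 1) none ++ post) := by
            conv_lhs => rw [hdecomp]
            simp
          have hlenj2 : (pre ++ (some v : Option Int) :: t.take p).length = pre.length + 1 + p := by
            simp [hlent0]; omega
          rw [hs, ← hlenj2, set_append_len]
          simp
        rw [hset1, hset2]
        have hlen3 : pre.length + 1 = (pre ++ [some v]).length := by simp
        rw [hlen3]
        rw [ih (t.take p) (pre ++ [some v])
            ((none : Option Int) :: (List.replicate (t.length - p - 1) none ++ post))
            _ n (by simp only [List.length_cons] at hL; simp only [hlent0]; omega)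
            (fun x hx => by
              rcases List.mem_cons.mp hx with hx1 | hx2
              · exact hx1
              · exact htail_none x hx2)
            (by
              simp only [List.length_append, List.length_cons, List.length_nil, hlent0]
              push_cast
              omega)
            (by
              simp only [List.length_append, List.length_cons, List.length_nil, List.length_replicate,
                hlent0] at hn ⊢
              omega)]
        rw [cf_none_some t p v ht]
        have hrep : (none : Option Int) :: List.replicate (t.length - p - 1) none
            = List.replicate (t.length - p) none := by
          rw [← List.replicate_succ]
          congr 1
          omega
        simp only [List.append_assoc, List.cons_append, List.singleton_append, List.nil_append]
        rw [← hrep]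
        simp

theorem defrag_eq_cf : ∀ (fm : List (Option Int)), defrag fm = cf fm := by
  intro fm
  unfold defrag
  have h := outer_main fm.length fm [] [] ((fm.length : Int) - 1) fm.length le_rfl
    (by intro x hx; simp at hx) (by simp) (by simp)
  simpa using h

-- ===== VERDICT (by name: the statement is the Claim_ definition above) =====
theorem defrag_spec : Claim_equal_defrag := by
  intro fm _
  unfold Spec_defrag
  rw [defrag_eq_cf, cf_eq_build, defrag_alt_eq_build]
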